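-- pv_equiv track=rewrite | github.com/nits2010/DataStructureAlgo | build_company_question_list.py | choose_best_title
-- ===== SOURCE A (Python) =====
-- from typing import List, Optional, Tuple
--
-- def choose_best_title(titles: List[str]) -> str:
--     """
--     Choose the best title from a list of titles for the same problem.
--     Prefer more complete or generic titles.
--     """
--     if not titles:
--         return ""
--
--     if len(titles) == 1:
--         return titles[0]
--
--     # Remove duplicates while preserving order
--     unique_titles = []
--     for title in titles:
--         if title not in unique_titles:
--             unique_titles.append(title)
--
--     if len(unique_titles) == 1:
--         return unique_titles[0]
--
--     # Prefer titles that don't contain implementation-specific terms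
--     non_specific = []
--     for title in unique_titles:
--         title_lower = title.lower()
--         if not any(term in title_lower for term in ["recursive", "iterative", "solution", "approach"]):
--             non_specific.append(title)
--
--     if non_specific:
--         # Return the longest non-specific title (usually most complete)
--         return max(non_specific, key=len)
--
--     # If all are specific, return the longest one
--     return max(unique_titles, key=len)
-- ===== SOURCE B (Python) =====
-- from typing import List
--
-- _TERMS = ("recursive", "iterative", "solution", "approach")
--
-- def _key(item):
--     title, idx = item
--     tl = title.lower()
--     return (any(term in tl for term in _TERMS), -len(title), idx)
--
-- def choose_best_title(titles: List[str]) -> str: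
--     if not titles:
--         return ""
--     first = {}
--     for i, t in enumerate(titles):
--         if t not in first:
--             first[t] = i
--     return min(first.items(), key=_key)[0]
-- ===== Notes on version B (the rewrite author's own statement) =====
-- stated objective: alternative
-- what changed: A's staged pipeline (O(n^2) list-membership dedup, a filter pass, max(key=len), and a fallback branch when no non-specific title exists) is replaced by a first-occurrence-index dict plus a single keyed min over the composite key (is_specific, -len, first_index), whose lexicographic order encodes the preference, the length maximum and the first-wins tie-break at once.
import Mathlib
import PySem

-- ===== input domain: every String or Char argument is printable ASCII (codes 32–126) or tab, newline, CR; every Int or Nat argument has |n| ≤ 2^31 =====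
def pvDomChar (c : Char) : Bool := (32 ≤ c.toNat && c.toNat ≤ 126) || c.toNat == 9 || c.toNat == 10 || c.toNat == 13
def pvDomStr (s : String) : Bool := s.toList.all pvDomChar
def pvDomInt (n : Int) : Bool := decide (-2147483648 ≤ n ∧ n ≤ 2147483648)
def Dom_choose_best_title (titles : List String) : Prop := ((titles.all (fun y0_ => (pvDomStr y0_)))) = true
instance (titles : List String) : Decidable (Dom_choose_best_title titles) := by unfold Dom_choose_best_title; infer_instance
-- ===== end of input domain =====

-- B replaces A's dedup-list + filter + max-with-fallback by a first-occurrence-index dict and ONE keyed min over the composite key (is_specific, -len, first_index) (objective: alternative selection by composite key; also avoids A's quadratic list-membership dedup).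


-- ===== PORT A =====
-- shared condition: any(term in title.lower() for term in [...])
def isSpecific (title : String) : Bool :=
  ["recursive", "iterative", "solution", "approach"].any
    (fun term => PySem.Str.isIn term (PySem.Str.lower title))

def choose_best_title (titles : List String) : String :=
  if titles = [] then ""
  else if titles.length = 1 then titles.headD ""
  else
    let unique_titles :=
      titles.foldl (fun acc title => if title ∈ acc then acc else acc ++ [title]) []
    if unique_titles.length = 1 then unique_titles.headD ""
    else
      let non_specific :=
        unique_titles.foldl
          (fun acc title => if !isSpecific title then acc ++ [title] else acc) []
      if non_specific ≠ [] then (PySem.List.max? non_specific PySem.Str.len).getD ""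
      else (PySem.List.max? unique_titles PySem.Str.len).getD ""

-- ===== PORT B =====
-- Source B's _key(item) = (is_specific, -len(title), first_index)
def pvKeyB (p : String × Int) : Bool × Int × Int :=
  (isSpecific p.1, -(PySem.Str.len p.1), p.2)

-- Python's lexicographic '<' on the (bool, int, int) key tuples (False < True)
def pvLtKey (a b : Bool × Int × Int) : Bool :=
  (!a.1 && b.1) ||
    (a.1 == b.1 && (decide (a.2.1 < b.2.1) || (a.2.1 == b.2.1 && decide (a.2.2 < b.2.2))))

-- one step of Python's min(..., key=_key): replace only on strictly smaller key
def pvMinStep (acc x : String × Int) : String × Int :=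
  if pvLtKey (pvKeyB x) (pvKeyB acc) then x else acc

def choose_best_title_alt (titles : List String) : String :=
  if titles = [] then ""
  else
    let first := (PySem.List.enumerate titles 0).foldl
      (fun d p => if d.contains p.2 then d else d.insert p.2 p.1) PySem.Dict.empty
    -- min(first.items(), key=_key)[0]; the [] branch is unreachable (titles ≠ [])
    match first.items with
    | [] => ""
    | p :: rest => (rest.foldl pvMinStep p).1

-- ===== PRECONDITION & SPEC =====
def Spec_choose_best_title (titles : List String) (out : String) : Prop := out = choose_best_title_alt titles
instance (titles : List String) (out : String) : Decidable (Spec_choose_best_title titles out) := by unfold Spec_choose_best_title; infer_instance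

-- ===== CLAIM (what is proved, stated in full; the proofs are below) =====
def Claim_equal_choose_best_title : Prop := ∀ (titles : List String), Dom_choose_best_title titles → Spec_choose_best_title titles (choose_best_title titles)

-- ===== LEMMAS AND PROOFS =====

-- A's order-preserving dedup loop, as a named function (syntactically A's fold).
def pvDedup (u l : List String) : List String :=
  l.foldl (fun acc title => if title ∈ acc then acc else acc ++ [title]) u

-- the common value both programs compute on the dedup list
def pvPick (u : List String) : String :=
  match PySem.List.max? (u.filter (fun s => !isSpecific s)) PySem.Str.len with
  | some b => b
  | none =>
    match PySem.List.max? u PySem.Str.len with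
    | some b => b
    | none => ""

-- two-component key and comparison (the index component of pvLtKey never decides,
-- because first-occurrence indices are strictly increasing)
def pvKey2 (t : String) : Bool × Int := (isSpecific t, -(PySem.Str.len t))
def pvLt2 (a b : Bool × Int) : Bool := (!a.1 && b.1) || (a.1 == b.1 && decide (a.2 < b.2))
def pvStep2 (acc t : String) : String := if pvLt2 (pvKey2 t) (pvKey2 acc) then t else acc

def pvStepMax (b : Option String) (title : String) : Option String :=
  match b with
  | none => some title
  | some b => if PySem.Str.len b < PySem.Str.len title then some title else some b

theorem pvDedup_prefix (l : List String) : ∀ u : List String, u <+: pvDedup u l := by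
  induction l with
  | nil => intro u; exact List.prefix_refl u
  | cons t l ih =>
    intro u
    show u <+: pvDedup (if t ∈ u then u else u ++ [t]) l
    refine List.IsPrefix.trans ?_ (ih _)
    by_cases h : t ∈ u <;> simp [h]

theorem pvMax?_foldl (xs : List String) :
    PySem.List.max? xs PySem.Str.len = xs.foldl pvStepMax none := by
  unfold PySem.List.max?
  congr 1
  funext acc x
  cases acc <;> rfl

theorem pvMax?_append (u : List String) (t : String) :
    PySem.List.max? (u ++ [t]) PySem.Str.len =
      pvStepMax (PySem.List.max? u PySem.Str.len) t := by
  rw [pvMax?_foldl, List.foldl_append, ← pvMax?_foldl]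
  rfl

theorem pvPick_singleton (x : String) : pvPick [x] = x := by
  unfold pvPick
  by_cases hs : isSpecific x <;> simp [hs, PySem.List.max?]

-- ===== A-side: choose_best_title = pvPick ∘ dedup =====
theorem pvA_eq_pick (titles : List String) :
    choose_best_title titles = pvPick (pvDedup [] titles) := by
  unfold pvPick
  match titles with
  | [] => rfl
  | t :: rest =>
    have hne : pvDedup [] (t :: rest) ≠ [] := by
      have h1 : pvDedup [] (t :: rest) = pvDedup [t] rest := by simp [pvDedup]
      have h2 := pvDedup_prefix rest [t]
      rw [h1]
      intro hnil
      rw [hnil] at h2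
      exact absurd (List.eq_nil_of_prefix_nil h2) (by simp)
    by_cases h1 : (t :: rest).length = 1
    · have hrest : rest = [] := by simpa using h1
      subst hrest
      have hd : pvDedup [] [t] = [t] := by simp [pvDedup]
      rw [hd]
      have := pvPick_singleton t
      unfold pvPick at this
      rw [this]
      simp [choose_best_title]
    · have hu : (t :: rest).foldl
          (fun acc title => if title ∈ acc then acc else acc ++ [title]) []
          = pvDedup [] (t :: rest) := rfl
      by_cases h2 : (pvDedup [] (t :: rest)).length = 1
      · obtain ⟨x, hx⟩ : ∃ x, pvDedup [] (t :: rest) = [x] := by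
          match hd : pvDedup [] (t :: rest) with
          | [] => exact absurd hd hne
          | [x] => exact ⟨x, rfl⟩
          | x :: y :: _ => rw [hd] at h2; simp at h2
        rw [hx]
        have := pvPick_singleton x
        unfold pvPick at this
        rw [this]
        simp only [choose_best_title, if_neg (by simp : ¬(t :: rest = [])), if_neg h1, hu, hx]
        simp
      · have hf : (pvDedup [] (t :: rest)).foldl
            (fun acc title => if !isSpecific title then acc ++ [title] else acc) []
            = (pvDedup [] (t :: rest)).filter (fun s => !isSpecific s) := by
          have := PySem.List.foldl_append_if (fun s => !isSpecific s) (id)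
            (pvDedup [] (t :: rest)) []
          simpa using this
        simp only [choose_best_title, if_neg (by simp : ¬(t :: rest = [])), if_neg h1, hu,
          if_neg h2, hf]
        by_cases h3 : (pvDedup [] (t :: rest)).filter (fun s => !isSpecific s) = []
        · rw [if_neg (by simp [h3])]
          rw [h3]
          have : PySem.List.max? ([] : List String) PySem.Str.len = none := rfl
          rw [this]
          obtain ⟨b, hb⟩ : ∃ b, PySem.List.max? (pvDedup [] (t :: rest)) PySem.Str.len = some b := by
            match hm : PySem.List.max? (pvDedup [] (t :: rest)) PySem.Str.len with
            | none => exact absurd ((PySem.List.max?_eq_none_iff _ _).mp hm) hne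
            | some b => exact ⟨b, rfl⟩
          rw [hb]
          rfl
        · rw [if_pos h3]
          obtain ⟨b, hb⟩ : ∃ b, PySem.List.max?
              ((pvDedup [] (t :: rest)).filter (fun s => !isSpecific s)) PySem.Str.len = some b := by
            match hm : PySem.List.max?
                ((pvDedup [] (t :: rest)).filter (fun s => !isSpecific s)) PySem.Str.len with
            | none => exact absurd ((PySem.List.max?_eq_none_iff _ _).mp hm) h3
            | some b => exact ⟨b, rfl⟩
          rw [hb]
          rfl

-- ===== B-side lemma 1: the dict loop builds (dedup titles) zipped with increasing first indices =====
theorem pvBuild_inv (xs : List String) : ∀ (s : Int) (d : PySem.Dict String Int),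
    d.keys.Nodup → (∀ p ∈ d.items, p.2 < s) → d.items.Pairwise (fun p q => p.2 < q.2) →
    (((PySem.List.enumerate xs s).foldl
        (fun d p => if d.contains p.2 then d else d.insert p.2 p.1) d).items.map (·.1)
      = pvDedup (d.items.map (·.1)) xs)
    ∧ ((PySem.List.enumerate xs s).foldl
        (fun d p => if d.contains p.2 then d else d.insert p.2 p.1) d).items.Pairwise
        (fun p q => p.2 < q.2)
    ∧ (∀ p ∈ ((PySem.List.enumerate xs s).foldl
        (fun d p => if d.contains p.2 then d else d.insert p.2 p.1) d).items, p.2 < s + xs.length) := by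
  induction xs with
  | nil =>
    intro s d hnd hlt hpw
    refine ⟨rfl, hpw, ?_⟩
    intro p hp
    simpa using hlt p hp
  | cons x xs ih =>
    intro s d hnd hlt hpw
    rw [PySem.List.enumerate_cons, List.foldl_cons]
    have hkeys : d.keys = d.items.map (·.1) := rfl
    by_cases hc : d.contains x = true
    · have hmem : x ∈ d.items.map (·.1) := by
        rw [← hkeys]
        exact (PySem.Dict.contains_iff_mem_keys d x).mp hc
      have hstep : (if d.contains (s, x).2 then d else d.insert (s, x).2 (s, x).1) = d := by
        simp [hc]
      rw [hstep]
      have hlt' : ∀ p ∈ d.items, p.2 < s + 1 := fun p hp => by have := hlt p hp; omega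
      obtain ⟨ha, hb, hc2⟩ := ih (s + 1) d hnd hlt' hpw
      refine ⟨?_, hb, ?_⟩
      · rw [ha]; simp [pvDedup, hmem]
      · intro p hp; have := hc2 p hp; simp only [List.length_cons]; push_cast; omega
    · have hc' : d.contains x = false := by simpa using hc
      have hmem : x ∉ d.items.map (·.1) := by
        rw [← hkeys]
        intro hm
        rw [(PySem.Dict.contains_iff_mem_keys d x).mpr hm] at hc'
        exact absurd hc' (by simp)
      have hstep : (if d.contains (s, x).2 then d else d.insert (s, x).2 (s, x).1)
          = d.insert x s := by simp [hc']
      rw [hstep]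
      have hitems : (d.insert x s).items = d.items ++ [(x, s)] :=
        PySem.Dict.items_insert_of_not_contains d s hc'
      have hnd' : (d.insert x s).keys.Nodup := PySem.Dict.nodup_keys_insert d x s hnd
      have hlt' : ∀ p ∈ (d.insert x s).items, p.2 < s + 1 := by
        intro p hp
        rw [hitems] at hp
        rcases List.mem_append.mp hp with h | h
        · have := hlt p h; omega
        · simp at h; subst h; omega
      have hpw' : (d.insert x s).items.Pairwise (fun p q => p.2 < q.2) := by
        rw [hitems]
        refine List.pairwise_append.mpr ⟨hpw, by simp, ?_⟩
        intro p hp q hq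
        simp at hq
        subst hq
        exact hlt p hp
      obtain ⟨ha, hb, hc2⟩ := ih (s + 1) (d.insert x s) hnd' hlt' hpw'
      refine ⟨?_, hb, ?_⟩
      · rw [ha, hitems]
        simp [pvDedup, hmem]
      · intro p hp; have := hc2 p hp; simp only [List.length_cons]; push_cast; omega

-- ===== B-side lemma 2: with strictly increasing indices, the 3-component min-fold is the 2-component fold on titles =====
theorem pvMinFold_eq (rest : List (String × Int)) : ∀ (p : String × Int),
    (∀ q ∈ rest, p.2 < q.2) → rest.Pairwise (fun a b => a.2 < b.2) →
    (rest.foldl pvMinStep p).1 = (rest.map (·.1)).foldl pvStep2 p.1 := by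
  induction rest with
  | nil => intro p _ _; rfl
  | cons q rest ih =>
    intro p hlt hpw
    have hqp : ¬ (q.2 < p.2) := by have := hlt q (by simp); omega
    have hkey : pvLtKey (pvKeyB q) (pvKeyB p) = pvLt2 (pvKey2 q.1) (pvKey2 p.1) := by
      simp [pvLtKey, pvLt2, pvKeyB, pvKey2, hqp]
    have hstep : pvMinStep p q =
        if pvLt2 (pvKey2 q.1) (pvKey2 p.1) then q else p := by
      rw [pvMinStep, hkey]
    rw [List.foldl_cons, List.map_cons, List.foldl_cons, hstep]
    have hpw' : rest.Pairwise (fun a b => a.2 < b.2) := hpw.of_cons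
    by_cases hl : pvLt2 (pvKey2 q.1) (pvKey2 p.1) = true
    · rw [if_pos hl]
      have : pvStep2 p.1 q.1 = q.1 := by rw [pvStep2, if_pos hl]
      rw [this]
      exact ih q (fun r hr => List.rel_of_pairwise_cons hpw hr) hpw'
    · rw [if_neg hl]
      have : pvStep2 p.1 q.1 = p.1 := by rw [pvStep2, if_neg hl]
      rw [this]
      exact ih p (fun r hr => hlt r (by simp [hr])) hpw'

-- ===== B-side lemma 3: the 2-component min-fold computes pvPick =====
theorem pvPick_append (u : List String) (hu : u ≠ []) (t : String) :
    pvPick (u ++ [t]) = pvStep2 (pvPick u) t := by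
  have hfil : (u ++ [t]).filter (fun s => !isSpecific s)
      = u.filter (fun s => !isSpecific s) ++ if !isSpecific t then [t] else [] := by
    by_cases hs : isSpecific t <;> simp [List.filter_append, hs]
  by_cases h3 : u.filter (fun s => !isSpecific s) = []
  · -- every element of u is specific; pvPick u is the overall max, a specific title
    obtain ⟨m, hm⟩ : ∃ m, PySem.List.max? u PySem.Str.len = some m := by
      match hm : PySem.List.max? u PySem.Str.len with
      | none => exact absurd ((PySem.List.max?_eq_none_iff _ _).mp hm) hu
      | some m => exact ⟨m, rfl⟩
    have hmem : m ∈ u := PySem.List.max?_mem hm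
    have hms : isSpecific m = true := by
      have := List.filter_eq_nil_iff.mp h3 m hmem
      simpa using this
    have hpu : pvPick u = m := by
      unfold pvPick
      rw [h3]
      have : PySem.List.max? ([] : List String) PySem.Str.len = none := rfl
      rw [this, hm]
    rw [hpu]
    by_cases hs : isSpecific t = true
    · -- t specific too: compare lengths among max? (u ++ [t])
      have hfil' : (u ++ [t]).filter (fun s => !isSpecific s) = [] := by
        rw [hfil]; simp [hs, h3]
      unfold pvPick
      rw [hfil']
      have : PySem.List.max? ([] : List String) PySem.Str.len = none := rfl
      rw [this, pvMax?_append, hm]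
      simp only [pvStepMax, pvStep2, pvLt2, pvKey2, hs, hms]
      by_cases hlen : PySem.Str.len m < PySem.Str.len t
      · rw [if_pos hlen, if_pos (by simp [PySem.Str.len] at hlen ⊢; omega)]
      · rw [if_neg hlen, if_neg (by simp [PySem.Str.len] at hlen ⊢; omega)]
    · -- t non-specific: it becomes the only non-specific title, and wins
      have hs' : isSpecific t = false := by simpa using hs
      have hfil' : (u ++ [t]).filter (fun s => !isSpecific s) = [t] := by
        rw [hfil]; simp [hs', h3]
      unfold pvPick
      rw [hfil']
      have h1 : PySem.List.max? [t] PySem.Str.len = some t := rfl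
      rw [h1]
      simp [pvStep2, pvLt2, pvKey2, hs', hms]
  · -- some non-specific title exists in u; pvPick u is the non-specific max
    obtain ⟨b, hb⟩ : ∃ b, PySem.List.max? (u.filter (fun s => !isSpecific s)) PySem.Str.len
        = some b := by
      match hm : PySem.List.max? (u.filter (fun s => !isSpecific s)) PySem.Str.len with
      | none => exact absurd ((PySem.List.max?_eq_none_iff _ _).mp hm) h3
      | some b => exact ⟨b, rfl⟩
    have hbns : isSpecific b = false := by
      have := List.mem_filter.mp (PySem.List.max?_mem hb)
      simpa using this.2
    have hpu : pvPick u = b := by unfold pvPick; rw [hb]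
    rw [hpu]
    by_cases hs : isSpecific t = true
    · -- t specific: filter unchanged, b stays
      have hfil' : (u ++ [t]).filter (fun s => !isSpecific s)
          = u.filter (fun s => !isSpecific s) := by rw [hfil]; simp [hs]
      unfold pvPick
      rw [hfil', hb]
      simp [pvStep2, pvLt2, pvKey2, hs, hbns]
    · -- t non-specific: running max on the filtered list
      have hs' : isSpecific t = false := by simpa using hs
      have hfil' : (u ++ [t]).filter (fun s => !isSpecific s)
          = u.filter (fun s => !isSpecific s) ++ [t] := by rw [hfil]; simp [hs']
      unfold pvPick
      rw [hfil', pvMax?_append, hb]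
      simp only [pvStepMax, pvStep2, pvLt2, pvKey2, hs', hbns]
      by_cases hlen : PySem.Str.len b < PySem.Str.len t
      · rw [if_pos hlen, if_pos (by simp [PySem.Str.len] at hlen ⊢; omega)]
      · rw [if_neg hlen, if_neg (by simp [PySem.Str.len] at hlen ⊢; omega)]

theorem pvFold2_eq_pick (u : List String) : ∀ (h : String),
    u.foldl pvStep2 h = pvPick (h :: u) := by
  induction u using List.reverseRecOn with
  | nil => intro h; exact (pvPick_singleton h).symm
  | append_singleton u t ih =>
    intro h
    rw [List.foldl_append, List.foldl_cons, List.foldl_nil, ih h]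
    have := pvPick_append (h :: u) (by simp) t
    rw [← this]
    simp

theorem pvB_eq_pick (titles : List String) (hne : titles ≠ []) :
    choose_best_title_alt titles = pvPick (pvDedup [] titles) := by
  unfold choose_best_title_alt
  rw [if_neg hne]
  obtain ⟨ha, hb, -⟩ := pvBuild_inv titles 0 PySem.Dict.empty (by simp) (by simp [PySem.Dict.empty]) (by simp [PySem.Dict.empty])
  have hemp : (PySem.Dict.empty : PySem.Dict String Int).items.map (·.1) = [] := rfl
  rw [hemp] at ha
  have hdne : pvDedup [] titles ≠ [] := by
    match titles, hne with
    | t :: rest, _ =>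
      have h1 : pvDedup [] (t :: rest) = pvDedup [t] rest := by simp [pvDedup]
      have h2 := pvDedup_prefix rest [t]
      rw [h1]
      intro hnil
      rw [hnil] at h2
      exact absurd (List.eq_nil_of_prefix_nil h2) (by simp)
  show (match ((PySem.List.enumerate titles 0).foldl
      (fun d p => if d.contains p.2 then d else d.insert p.2 p.1)
      PySem.Dict.empty).items with
    | [] => ""
    | p :: rest => (rest.foldl pvMinStep p).1) = pvPick (pvDedup [] titles)
  cases hit : ((PySem.List.enumerate titles 0).foldl
      (fun d p => if d.contains p.2 then d else d.insert p.2 p.1)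
      PySem.Dict.empty).items with
  | nil =>
    rw [hit] at ha
    exact absurd ha.symm (by simpa using hdne)
  | cons p rest =>
    rw [hit] at ha hb
    show (rest.foldl pvMinStep p).1 = pvPick (pvDedup [] titles)
    rw [pvMinFold_eq rest p (fun q hq => List.rel_of_pairwise_cons hb hq) hb.of_cons]
    rw [pvFold2_eq_pick]
    have : p.1 :: rest.map (·.1) = (p :: rest).map (·.1) := rfl
    rw [this, ha]

-- ===== VERDICT (by name: the statement is the Claim_ definition above) =====
theorem choose_best_title_spec : Claim_equal_choose_best_title := by
  intro titles _
  unfold Spec_choose_best_title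
  by_cases hne : titles = []
  · subst hne; rfl
  · rw [pvA_eq_pick, pvB_eq_pick titles hne]
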